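-- pv_equiv track=rewrite | github.com/joaovitortor/fundamento-algoritmo-I | listarecursiva/ex12.py | lst_binaria
-- ===== SOURCE A (Python) =====
-- def lst_binaria(lst: list[int]) -> bool:
--     if lst == []:
--         eh_binaria = False
--     elif len(lst) == 1:
--         if lst[0] != 1 and lst[0] != 0:
--             eh_binaria = False
--         else:
--             eh_binaria = True
--     else:
--         if lst[0] != 1 and lst[0] != 0:
--             eh_binaria = False
--         else:
--             eh_binaria = True and lst_binaria(lst[1:])
--
--     return eh_binaria
-- ===== SOURCE B (Python) =====
-- def lst_binaria(lst: list[int]) -> bool: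
--     if not lst:
--         return False
--     for x in lst:
--         if x != 0 and x != 1:
--             return False
--     return True
-- ===== Notes on version B (the rewrite author's own statement) =====
-- stated objective: simpler
-- what changed: Replaced the slice-based recursion over lst[1:] with a single flat iterative pass that returns False early, plus an explicit empty-list guard.
import Mathlib
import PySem

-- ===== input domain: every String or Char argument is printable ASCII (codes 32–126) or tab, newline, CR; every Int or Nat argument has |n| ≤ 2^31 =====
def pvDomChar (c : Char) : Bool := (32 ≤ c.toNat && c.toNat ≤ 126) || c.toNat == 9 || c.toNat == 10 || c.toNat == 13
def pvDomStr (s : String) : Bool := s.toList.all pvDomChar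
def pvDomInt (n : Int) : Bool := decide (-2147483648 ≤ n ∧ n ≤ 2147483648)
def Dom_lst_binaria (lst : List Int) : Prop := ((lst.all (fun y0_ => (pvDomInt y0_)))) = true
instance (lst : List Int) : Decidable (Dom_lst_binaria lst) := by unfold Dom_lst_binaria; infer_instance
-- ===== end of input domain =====

-- B replaces A's slice-based recursion with one flat early-exit loop (plus an empty-list guard); return value only.

-- ===== PORT A =====
-- literal transliteration of A: branch on [], singleton, else recurse on lst[1:]
def lst_binaria (lst : List Int) : Bool :=
  match lst with
  | [] => false
  | [x] => if x ≠ 1 ∧ x ≠ 0 then false else true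
  | x :: rest =>  -- rest = lst[1:]
      if x ≠ 1 ∧ x ≠ 0 then false else (true && lst_binaria rest)

-- ===== PORT B =====
-- the 'for x in lst' loop with early return False
def lstBinariaLoop (lst : List Int) : Bool :=
  match lst with
  | [] => true
  | x :: rest => if x ≠ 0 ∧ x ≠ 1 then false else lstBinariaLoop rest

def lst_binaria_alt (lst : List Int) : Bool :=
  if lst = [] then false else lstBinariaLoop lst

-- ===== PRECONDITION & SPEC =====
def Spec_lst_binaria (lst : List Int) (out : Bool) : Prop := out = lst_binaria_alt lst
instance (lst : List Int) (out : Bool) : Decidable (Spec_lst_binaria lst out) := by unfold Spec_lst_binaria; infer_instance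

-- ===== CLAIM (what is proved, stated in full; the proofs are below) =====
def Claim_equal_lst_binaria : Prop := ∀ (lst : List Int), Dom_lst_binaria lst → Spec_lst_binaria lst (lst_binaria lst)

-- ===== LEMMAS AND PROOFS =====
theorem lst_binaria_cons (x : Int) (l : List Int) :
    lst_binaria (x :: l) = lstBinariaLoop (x :: l) := by
  induction l generalizing x with
  | nil =>
      simp only [lst_binaria, lstBinariaLoop]
      by_cases h0 : x = 0 <;> by_cases h1 : x = 1 <;> simp [h0, h1]
  | cons y t ih =>
      simp only [lst_binaria, lstBinariaLoop, ih y]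
      by_cases h0 : x = 0 <;> by_cases h1 : x = 1 <;> simp [h0, h1]

-- ===== VERDICT (by name: the statement is the Claim_ definition above) =====
theorem lst_binaria_spec : Claim_equal_lst_binaria := by
  intro lst _
  unfold Spec_lst_binaria lst_binaria_alt
  match lst with
  | [] => simp [lst_binaria]
  | x :: l => simp [lst_binaria_cons]
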